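-- pv_equiv track=rewrite | github.com/1217265165/FMFD_python | features/evidence_router.py | get_active_module_mask
-- ===== SOURCE A (Python) =====
-- from typing import Dict, List, Optional, Any, Set
--
-- def get_active_module_mask(
--     routing_result: Dict[str, Any],
--     total_modules: int = 21
-- ) -> List[bool]:
--     """
--     根据路由结果生成模块激活掩码。
--
--     Parameters
--     ----------
--     routing_result : dict
--         route_modules_by_evidence 的输出
--     total_modules : int
--         总模块数量
--
--     Returns
--     -------
--     list
--         布尔列表，True 表示模块激活
--     """
--     mask = [False] * total_modules
--     for idx in routing_result.get('candidate_modules', []):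
--         if 0 <= idx < total_modules:
--             mask[idx] = True
--     return mask
-- ===== SOURCE B (Python) =====
-- def get_active_module_mask(routing_result, total_modules=21):
--     def build(cands, prev):
--         # emit the run of False up to the next active index, then True, recurse
--         if not cands:
--             return [False] * (total_modules - prev)
--         i = cands[0]
--         return [False] * (i - prev) + [True] + build(cands[1:], i + 1)
--
--     cand = sorted({i for i in routing_result.get('candidate_modules', [])
--                    if 0 <= i < total_modules})
--     return build(cand, 0)
-- ===== Notes on version B (the rewrite author's own statement) =====
-- stated objective: alternative
-- what changed: B sorts the deduplicated in-range candidate indices and assembles the mask by run-length concatenation (a block of False between consecutive active indices, then True), recursing over the sorted candidates, instead of A's scatter-writes into a preallocated mutable list.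
import Mathlib
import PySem

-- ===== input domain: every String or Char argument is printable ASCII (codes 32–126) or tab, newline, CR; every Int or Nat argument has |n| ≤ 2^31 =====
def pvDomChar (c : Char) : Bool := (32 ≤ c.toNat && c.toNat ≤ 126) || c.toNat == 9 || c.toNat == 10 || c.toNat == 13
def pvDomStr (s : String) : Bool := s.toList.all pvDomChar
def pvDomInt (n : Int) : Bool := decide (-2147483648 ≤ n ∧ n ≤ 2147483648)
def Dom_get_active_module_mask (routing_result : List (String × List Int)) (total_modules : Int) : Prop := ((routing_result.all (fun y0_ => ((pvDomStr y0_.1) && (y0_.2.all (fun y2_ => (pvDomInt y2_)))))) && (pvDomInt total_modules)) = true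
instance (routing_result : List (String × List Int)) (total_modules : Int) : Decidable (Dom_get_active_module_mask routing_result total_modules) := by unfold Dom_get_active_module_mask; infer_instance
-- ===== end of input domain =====

-- B replaces A's scatter-writes into a preallocated mutable list by sorting the
-- deduplicated in-range candidates and assembling the mask as concatenated runs
-- of False with a True at each sorted candidate (alternative algorithm, same result).

-- ===== PORT A =====
def get_active_module_mask (routing_result : List (String × List Int)) (total_modules : Int) : List Bool :=
  ((PySem.Dict.mk routing_result).getD "candidate_modules" []).foldl
    (fun mask idx =>
      if 0 ≤ idx ∧ idx < total_modules then PySem.List.pySetD mask idx true else mask)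
    (List.replicate total_modules.toNat false)

-- ===== PORT B =====
-- Source B's inner 'build': run of False up to the next active index, then True, recurse.
def pvBuild (total_modules : Int) : List Int → Int → List Bool
  | [], prev => List.replicate (total_modules - prev).toNat false
  | i :: rest, prev =>
      List.replicate (i - prev).toNat false ++ [true] ++ pvBuild total_modules rest (i + 1)

def get_active_module_mask_alt (routing_result : List (String × List Int)) (total_modules : Int) : List Bool :=
  let cand : List Int :=
    PySem.List.sorted
      (PySem.Set.ofList (((PySem.Dict.mk routing_result).getD "candidate_modules" []).filter
        (fun i => decide (0 ≤ i) && decide (i < total_modules))))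
      (fun x => x) false
  pvBuild total_modules cand 0

-- ===== PRECONDITION & SPEC =====
def Spec_get_active_module_mask (routing_result : List (String × List Int)) (total_modules : Int) (out : List Bool) : Prop := out = get_active_module_mask_alt routing_result total_modules
instance (routing_result : List (String × List Int)) (total_modules : Int) (out : List Bool) : Decidable (Spec_get_active_module_mask routing_result total_modules out) := by unfold Spec_get_active_module_mask; infer_instance

-- ===== CLAIM (what is proved, stated in full; the proofs are below) =====
def Claim_equal_get_active_module_mask : Prop := ∀ (routing_result : List (String × List Int)) (total_modules : Int), Dom_get_active_module_mask routing_result total_modules → Spec_get_active_module_mask routing_result total_modules (get_active_module_mask routing_result total_modules)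

-- ===== LEMMAS AND PROOFS =====

-- A's loop, elementwise: position j ends up true iff it started true or some
-- in-range candidate hits it.
theorem foldA_getElem? (t : Int) (cs : List Int) (mask : List Bool) (j : Nat) :
    (cs.foldl (fun mask idx =>
        if 0 ≤ idx ∧ idx < t then PySem.List.pySetD mask idx true else mask) mask)[j]? =
      mask[j]?.map (fun b => b || cs.any (fun idx => decide (0 ≤ idx ∧ idx < t ∧ idx.toNat = j))) := by
  induction cs generalizing mask with
  | nil => simp
  | cons c cs ih =>
    simp only [List.foldl_cons, List.any_cons, ih]
    by_cases h : 0 ≤ c ∧ c < t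
    · rw [if_pos h, PySem.List.pySetD_of_nonneg mask true h.1, List.getElem?_set]
      by_cases hj : c.toNat = j
      · subst hj
        by_cases hlt : c.toNat < mask.length
        · simp [hlt, h]
        · simp [hlt]
      · simp only [if_neg hj]
        congr 1
        funext b
        simp [hj, h]
    · rw [if_neg h]
      congr 1
      funext b
      have : ¬ (0 ≤ c ∧ c < t ∧ c.toNat = j) := fun hc => h ⟨hc.1, hc.2.1⟩
      simp [this]

-- B's builder, elementwise: for a strictly increasing list of candidates inside
-- [prev, t), position j of the built segment is the membership of prev + j.
theorem pvBuild_getElem? (t : Int) (cs : List Int) (prev : Int) (j : Nat)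
    (hs : cs.Pairwise (· < ·)) (hb : ∀ x ∈ cs, prev ≤ x ∧ x < t) :
    (pvBuild t cs prev)[j]? =
      if j < (t - prev).toNat then some (decide ((prev + (j : Int)) ∈ cs)) else none := by
  induction cs generalizing prev j with
  | nil => simp [pvBuild, List.getElem?_replicate]
  | cons i rest ih =>
    have hi : prev ≤ i ∧ i < t := hb i (by simp)
    have hrest : ∀ x ∈ rest, i + 1 ≤ x ∧ x < t := by
      intro x hx
      exact ⟨by have := (List.pairwise_cons.mp hs).1 x hx; omega, (hb x (by simp [hx])).2⟩
    have hsr : rest.Pairwise (· < ·) := (List.pairwise_cons.mp hs).2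
    simp only [pvBuild]
    rw [show List.replicate (i - prev).toNat false ++ [true] ++ pvBuild t rest (i + 1)
          = List.replicate (i - prev).toNat false ++ (true :: pvBuild t rest (i + 1)) by simp]
    by_cases h1 : j < (i - prev).toNat
    · rw [List.getElem?_append_left (by simpa using h1), List.getElem?_replicate, if_pos h1]
      have hne : (prev + (j : Int)) ≠ i := by omega
      have hnr : (prev + (j : Int)) ∉ rest := by
        intro hx; have := (hrest _ hx).1; omega
      have hjt : j < (t - prev).toNat := by omega
      simp [hjt, hne, hnr]
    · rw [List.getElem?_append_right (by simpa using h1), List.length_replicate]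
      by_cases h2 : j = (i - prev).toNat
      · subst h2
        have h0 : (i - prev).toNat - (i - prev).toNat = 0 := by omega
        rw [h0, List.getElem?_cons_zero]
        have hjt : (i - prev).toNat < (t - prev).toNat := by omega
        have hm : (prev + (((i - prev).toNat : Nat) : Int)) ∈ i :: rest := by
          have heq : prev + (((i - prev).toNat : Nat) : Int) = i := by omega
          rw [heq]; exact List.mem_cons_self
        rw [if_pos hjt, decide_eq_true hm]
      · have hcons : j - (i - prev).toNat = (j - (i - prev).toNat - 1) + 1 := by omega
        rw [hcons, List.getElem?_cons_succ, ih (i + 1) (j - (i - prev).toNat - 1) hsr hrest]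
        have hpj : (i + 1) + ((j - (i - prev).toNat - 1 : Nat) : Int) = prev + (j : Int) := by
          omega
        have hcnd : (j - (i - prev).toNat - 1 < (t - (i + 1)).toNat) ↔ (j < (t - prev).toNat) := by
          omega
        rw [hpj]
        by_cases h3 : j < (t - prev).toNat
        · rw [if_pos (hcnd.mpr h3), if_pos h3]
          have hne : (prev + (j : Int)) ≠ i := by omega
          simp [hne]
        · rw [if_neg (fun hc => h3 (hcnd.mp hc)), if_neg h3]

theorem get_active_module_mask_spec : Claim_equal_get_active_module_mask := by
  intro rr t _
  unfold Spec_get_active_module_mask get_active_module_mask get_active_module_mask_alt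
  set cs := (PySem.Dict.mk rr).getD "candidate_modules" [] with hcs
  set srt := PySem.List.sorted
      (PySem.Set.ofList (cs.filter (fun i => decide (0 ≤ i) && decide (i < t))))
      (fun x => x) false with hsrt
  have hpair : srt.Pairwise (· < ·) := PySem.List.sorted_ofList_pairwise_lt _
  have hmem : ∀ x, x ∈ srt ↔ (x ∈ cs ∧ 0 ≤ x ∧ x < t) := by
    intro x
    rw [hsrt, PySem.List.mem_sorted, PySem.Set.mem_ofList, List.mem_filter]
    simp
  have hb : ∀ x ∈ srt, 0 ≤ x ∧ x < t := fun x hx => ((hmem x).mp hx).2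
  apply List.ext_getElem?
  intro j
  rw [foldA_getElem?, pvBuild_getElem? t srt 0 j hpair hb]
  by_cases hj : j < t.toNat
  · have h1 : (List.replicate t.toNat (false : Bool))[j]? = some false := by simp [hj]
    rw [h1, if_pos (by omega)]
    simp only [Option.map_some, Bool.false_or]
    congr 1
    rw [Bool.eq_iff_iff, List.any_eq_true]
    constructor
    · rintro ⟨idx, hin, hp⟩
      simp only [decide_eq_true_eq] at hp
      have : (0 + (j : Int)) = idx := by omega
      rw [decide_eq_true_eq, this, hmem]
      exact ⟨hin, hp.1, hp.2.1⟩
    · intro hx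
      rw [decide_eq_true_eq, hmem] at hx
      refine ⟨0 + (j : Int), hx.1, ?_⟩
      simp only [decide_eq_true_eq]
      omega
  · rw [List.getElem?_eq_none (by simp; omega), if_neg (by omega)]
    rfl
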